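-- pv_equiv track=rewrite | github.com/m38109/Reasoning_and_Intelligent_Systems_Group_Project | main.py | count_column_conflicts
-- ===== SOURCE A (Python) =====
-- GRID_SIZE = 4
--
-- def count_column_conflicts(grid):
--     count_conflicts = 0
--     for col in range(GRID_SIZE):
--         letter_counts = {}
--         for row in grid:
--             letter = row[col]
--             if letter:
--                 if letter in letter_counts:
--                     count_conflicts += 1
--                 else:
--                     letter_counts[letter] = 1
--     return count_conflicts
-- ===== SOURCE B (Python) =====
-- GRID_SIZE = 4
--
-- def count_column_conflicts(grid):
--     total = 0
--     for col in range(GRID_SIZE):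
--         column = sorted(row[col] for row in grid if row[col])
--         for prev, cur in zip(column, column[1:]):
--             if prev == cur:
--                 total += 1
--     return total
-- ===== Notes on version B (the rewrite author's own statement) =====
-- stated objective: alternative
-- what changed: Instead of scanning each column while maintaining a seen-dictionary and incrementing on each membership hit, B sorts the truthy cells of each column and counts adjacent equal pairs in the sorted order (duplicates become neighbours after sorting), trading hash-membership detection for sort-then-adjacent-scan at O(rows log rows) per column.
-- outside the precondition, e.g. on count_column_conflicts([['A']]): A raises IndexError, B raises IndexError
import Mathlib
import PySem

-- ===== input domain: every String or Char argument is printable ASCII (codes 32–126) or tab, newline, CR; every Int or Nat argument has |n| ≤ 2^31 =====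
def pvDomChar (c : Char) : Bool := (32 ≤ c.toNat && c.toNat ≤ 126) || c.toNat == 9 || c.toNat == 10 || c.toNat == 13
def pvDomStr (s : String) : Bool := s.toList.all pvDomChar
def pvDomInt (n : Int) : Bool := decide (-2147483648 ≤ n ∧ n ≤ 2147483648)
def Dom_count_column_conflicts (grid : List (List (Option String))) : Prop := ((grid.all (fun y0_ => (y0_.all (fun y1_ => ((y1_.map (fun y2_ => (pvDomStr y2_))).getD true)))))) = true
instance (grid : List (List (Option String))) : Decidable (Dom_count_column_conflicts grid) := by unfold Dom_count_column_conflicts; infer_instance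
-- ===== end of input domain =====

-- B replaces A's scan-with-seen-dict conflict detection by sorting each column's
-- truthy cells and counting adjacent equal pairs; proved equal to A on rows of length ≥ 4.

-- ===== PORT A =====
-- row[col] is in range under Pre_ (every row has length ≥ 4), so pyGetD's default is never used
def count_column_conflicts (grid : List (List (Option String))) : Int :=
  (PySem.List.pyRange 0 4 1).foldl (fun cc col =>
    (grid.foldl (fun (st : Int × PySem.Dict String Int) row =>
      let letter := PySem.List.pyGetD row col none
      match letter with
      | none => st
      | some s =>
        if s = "" then st
        else if st.2.contains s then (st.1 + 1, st.2)
        else (st.1, st.2.insert s 1))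
      (cc, (PySem.Dict.empty : PySem.Dict String Int))).1) 0

-- ===== PORT B =====
-- 'row[col] for row in grid if row[col]' keeps exactly the non-None, non-empty strings
def count_column_conflicts_alt (grid : List (List (Option String))) : Int :=
  (PySem.List.pyRange 0 4 1).foldl (fun total col =>
    let column := PySem.List.sorted (grid.filterMap (fun row =>
      match PySem.List.pyGetD row col none with
      | none => none
      | some s => if s = "" then none else some s)) (fun x => x) false
    (column.zip (PySem.List.slice column (some 1) none)).foldl
      (fun t p => if p.1 = p.2 then t + 1 else t) total) 0

-- ===== PRECONDITION & SPEC =====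
-- Pre_ excludes exactly the grids with a row shorter than GRID_SIZE = 4, on which Python A raises IndexError.
def Pre_count_column_conflicts (grid : List (List (Option String))) : Prop :=
  ∀ row ∈ grid, 4 ≤ row.length
instance (grid : List (List (Option String))) : Decidable (Pre_count_column_conflicts grid) := by unfold Pre_count_column_conflicts; infer_instance

def pvWitness_count_column_conflicts : List (List (Option String)) :=
  [[some "A", some "B", none, some "A"], [some "A", some "", some "C", some "A"]]

def Spec_count_column_conflicts (grid : List (List (Option String))) (out : Int) : Prop := out = count_column_conflicts_alt grid
instance (grid : List (List (Option String))) (out : Int) : Decidable (Spec_count_column_conflicts grid out) := by unfold Spec_count_column_conflicts; infer_instance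

-- ===== CLAIM (what is proved, stated in full; the proofs are below) =====
def Claim_equal_count_column_conflicts : Prop := ∀ (grid : List (List (Option String))), Dom_count_column_conflicts grid → Pre_count_column_conflicts grid → Spec_count_column_conflicts grid (count_column_conflicts grid)

-- ===== LEMMAS AND PROOFS =====

-- the per-letter step of A's inner loop, after the truthiness filter
def pvStepA (st : Int × PySem.Dict String Int) (s : String) : Int × PySem.Dict String Int :=
  if st.2.contains s then (st.1 + 1, st.2) else (st.1, st.2.insert s 1)

-- A's inner loop over rows is pvStepA folded over the extracted column letters
theorem pvFoldBridge (rows : List (List (Option String))) (col : Int)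
    (st : Int × PySem.Dict String Int) :
    rows.foldl (fun st row =>
      let letter := PySem.List.pyGetD row col none
      match letter with
      | none => st
      | some s =>
        if s = "" then st
        else if st.2.contains s then (st.1 + 1, st.2)
        else (st.1, st.2.insert s 1)) st
    = (rows.filterMap (fun row =>
        match PySem.List.pyGetD row col none with
        | none => none
        | some s => if s = "" then none else some s)).foldl pvStepA st := by
  induction rows generalizing st with
  | nil => rfl
  | cons r rs ih =>
    simp only [List.foldl_cons, List.filterMap_cons]
    cases h : PySem.List.pyGetD r col none with
    | none => simpa using ih st
    | some s =>
      by_cases hs : s = "" <;> simp [hs, pvStepA, ih]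

-- invariant: the count gained over a letters list equals (letters consumed) − (new distinct keys)
theorem pvInvariant (letters : List String) (c : Int) (d : PySem.Dict String Int)
    (S : PySem.Set String) (h : ∀ s, d.contains s = S.contains s) :
    (letters.foldl pvStepA (c, d)).1 + ((PySem.Set.update S letters).length : Int)
      = c + letters.length + S.length := by
  induction letters generalizing c d S with
  | nil => simp [PySem.Set.update]
  | cons x xs ih =>
    have hupd : PySem.Set.update S (x :: xs) = PySem.Set.update (PySem.Set.add S x) xs := rfl
    simp only [List.foldl_cons, pvStepA, h x, hupd]
    by_cases hx : x ∈ S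
    · have hc : S.contains x = true := (PySem.Set.contains_iff S x).mpr hx
      have hadd : PySem.Set.add S x = S := by simp [PySem.Set.add]; exact hx
      rw [hc, if_pos rfl, hadd]
      have := ih (c + 1) d S h
      simp only [List.length_cons] at this ⊢
      push_cast at this ⊢
      omega
    · have hc : S.contains x = false := by
        cases hcc : S.contains x with
        | false => rfl
        | true => exact absurd ((PySem.Set.contains_iff S x).mp hcc) hx
      have hadd : PySem.Set.add S x = S ++ [x] := by simp [PySem.Set.add]; exact hx
      rw [hc, if_neg (by simp), hadd]
      have h' : ∀ s, (d.insert x 1).contains s = (S ++ [x]).contains s := by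
        intro s
        rw [PySem.Dict.contains_insert, h s]
        by_cases hsx : s = x <;>
          simp [hsx, PySem.Set.contains_eq_listContains]
      have := ih c (d.insert x 1) (S ++ [x]) h'
      simp only [List.length_cons, List.length_append, List.length_nil] at this ⊢
      push_cast at this ⊢
      omega

-- A's per-column gain: (number of letters) − (number of distinct letters)
theorem pvColumnA (letters : List String) (c : Int) :
    (letters.foldl pvStepA (c, (PySem.Dict.empty : PySem.Dict String Int))).1
      = c + letters.length - letters.toFinset.card := by
  have h : ∀ s : String, (PySem.Dict.empty : PySem.Dict String Int).contains s
      = (PySem.Set.empty : PySem.Set String).contains s := by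
    intro s
    simp [PySem.Dict.contains_empty, PySem.Set.empty, PySem.Set.contains_eq_listContains]
  have hinv := pvInvariant letters c PySem.Dict.empty PySem.Set.empty h
  have hof : PySem.Set.update (PySem.Set.empty : PySem.Set String) letters
      = PySem.Set.ofList letters := rfl
  rw [hof] at hinv
  -- |set(letters)| = |letters.toFinset|: ofList is nodup with the same members
  have hfs : (PySem.Set.ofList letters).toFinset = letters.toFinset := by
    ext s; simp [List.mem_toFinset, PySem.Set.mem_ofList]
  have hlen : (PySem.Set.ofList letters).length = letters.toFinset.card := by
    rw [← hfs, List.toFinset_card_of_nodup (PySem.Set.nodup_ofList letters)]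
  rw [hlen] at hinv
  simp only [PySem.Set.empty, List.length_nil, Nat.cast_zero, add_zero] at hinv
  omega

-- B's core fact: in a ≤-sorted list, (adjacent equal pairs) + (distinct) = (length)
theorem pvAdjSorted (l : List String) (h : l.Pairwise (· ≤ ·)) :
    List.countP (fun p => p.1 == p.2) (l.zip l.tail) + l.toFinset.card = l.length := by
  induction l with
  | nil => simp
  | cons x t iht =>
    cases t with
    | nil => simp
    | cons y t =>
      have hxy : x ≤ y := (List.pairwise_cons.mp h).1 y (by simp)
      have htail : (y :: t).Pairwise (· ≤ ·) := (List.pairwise_cons.mp h).2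
      have ih := iht htail
      have hzip : ((x :: y :: t).zip (x :: y :: t).tail)
          = (x, y) :: ((y :: t).zip (y :: t).tail) := by simp
      rw [hzip, List.countP_cons]
      by_cases he : x = y
      · subst he
        have hcard : (x :: x :: t).toFinset = (x :: t).toFinset := by
          simp [List.toFinset_cons]
        rw [hcard]
        simp only [beq_self_eq_true, if_pos, List.length_cons] at ih ⊢
        omega
      · have hnot : x ∉ y :: t := by
          intro hx
          rcases List.mem_cons.mp hx with h1 | h2
          · exact he h1
          · have hy : y ≤ x := (List.pairwise_cons.mp htail).1 x h2
            exact he (le_antisymm hxy hy)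
        have hcard : (x :: y :: t).toFinset.card = (y :: t).toFinset.card + 1 := by
          rw [List.toFinset_cons, Finset.card_insert_of_notMem (by simpa using hnot)]
        have hbe : (x == y) = false := beq_eq_false_iff_ne.mpr he
        rw [hbe]
        simp only [Bool.false_eq_true, if_false, List.length_cons] at ih ⊢
        omega

-- B's per-column gain equals A's
theorem pvColumnB (letters : List String) (c : Int) :
    (((PySem.List.sorted letters (fun x => x) false).zip
        (PySem.List.slice (PySem.List.sorted letters (fun x => x) false) (some 1) none)).foldl
      (fun t p => if p.1 = p.2 then t + 1 else t) c)
      = c + letters.length - letters.toFinset.card := by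
  set s := PySem.List.sorted letters (fun x => x) false with hs
  rw [PySem.List.slice_from_one]
  have hperm : s.Perm letters := PySem.List.sorted_perm letters (fun x => x) false
  have hfs : s.toFinset = letters.toFinset := List.toFinset_eq_of_perm _ _ hperm
  have hlen : s.length = letters.length := hperm.length_eq
  have hpair : s.Pairwise (· ≤ ·) := PySem.List.sorted_pairwise letters (fun x => x)
  have hadj := pvAdjSorted s hpair
  have hfold : (s.zip s.tail).foldl (fun t p => if p.1 = p.2 then t + 1 else t) c
      = c + List.countP (fun p => p.1 == p.2) (s.zip s.tail) := by
    have := PySem.List.foldl_count_if (fun p : String × String => p.1 == p.2) (s.zip s.tail) c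
    simpa using this
  rw [hfold, hfs, hlen] at *
  omega

theorem pvFoldlCongr {α β : Type} (l : List β) (f g : α → β → α) (a : α)
    (h : ∀ a b, f a b = g a b) : l.foldl f a = l.foldl g a := by
  induction l generalizing a with
  | nil => rfl
  | cons x xs ih => simp only [List.foldl_cons, h]; exact ih _

-- ===== VERDICT (by name: the statement is the Claim_ definition above) =====
theorem count_column_conflicts_spec : Claim_equal_count_column_conflicts := by
  intro grid _ _
  unfold Spec_count_column_conflicts count_column_conflicts count_column_conflicts_alt
  apply pvFoldlCongr
  intro cc col
  rw [pvFoldBridge, pvColumnA]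
  rw [pvColumnB]
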